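-- pv_equiv track=rewrite | github.com/InstituteforDiseaseModeling/EMOD | Regression/shared_embedded_py_scripts/dtk_test/dtk_HINT_Support.py | build_values_from_property_values
-- ===== SOURCE A (Python) =====
-- def build_values_from_property_values(property_values_list):
--     """
--     recursive method to build the nested property name and value pairs from a list of property names and values
--     :param property_values_list: list of list of property name and values: [
--     ["QualityOfCare:Seed_1", "QualityOfCare:Susceptible_1"],
--     ["Risk:High", "Risk:Low"]]
--     :return: values_list: [
--     "QualityOfCare:Seed_1,Risk:High",
--     "QualityOfCare:Seed_1,Risk:Low",
--     "QualityOfCare:Susceptible_1,Risk:High",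
--     "QualityOfCare:Susceptible_1,Risk:Low"]
--     """
--     values_list = []
--     if len(property_values_list) == 0:
--         return values_list
--     elif len(property_values_list) == 1:
--         return property_values_list[0]
--
--     #for i in range(len(property_values_list)):
--     property_values = property_values_list[0]
--     for value in property_values:
--         values_list += [value+","+ new_value for new_value in build_values_from_property_values(property_values_list[1:])]
--     return values_list
-- ===== SOURCE B (Python) =====
-- def build_values_from_property_values(property_values_list):
--     if not property_values_list:
--         return []
--     acc = property_values_list[-1]
--     for lst in reversed(property_values_list[:-1]):
--         acc = [v + "," + s for v in lst for s in acc]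
--     return acc
-- ===== Notes on version B (the rewrite author's own statement) =====
-- stated objective: alternative
-- what changed: Replaced the recursion that re-evaluates the suffix product inside the per-value loop with a single iterative right-to-left fold over the lists; the measured cost is dominated by the output size in both.
import Mathlib
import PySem

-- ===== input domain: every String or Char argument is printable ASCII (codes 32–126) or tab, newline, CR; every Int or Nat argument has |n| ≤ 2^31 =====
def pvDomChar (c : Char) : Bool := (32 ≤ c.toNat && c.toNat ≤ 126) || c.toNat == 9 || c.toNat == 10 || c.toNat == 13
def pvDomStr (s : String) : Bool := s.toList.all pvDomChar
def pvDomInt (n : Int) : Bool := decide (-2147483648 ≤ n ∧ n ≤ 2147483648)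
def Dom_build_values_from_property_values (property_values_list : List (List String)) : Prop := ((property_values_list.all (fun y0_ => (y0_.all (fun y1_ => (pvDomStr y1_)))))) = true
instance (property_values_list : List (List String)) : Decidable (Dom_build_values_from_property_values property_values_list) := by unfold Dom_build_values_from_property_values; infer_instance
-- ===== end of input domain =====

-- B builds the same Cartesian-product strings with an iterative right-to-left fold instead of
-- A's per-value recursion (an alternative structure; cost is dominated by the output size).


-- ===== PORT A =====
-- literal port of A: base cases [] and [pv]; otherwise loop over the head values,
-- appending the comprehension over the recursive call on the tail each iteration
def build_values_from_property_values : List (List String) → List String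
  | [] => []
  | [pv] => pv
  | property_values :: rest@(_ :: _) =>
    property_values.foldl
      (fun values_list value =>
        values_list ++ (build_values_from_property_values rest).map (fun new_value => value ++ "," ++ new_value))
      []

-- ===== PORT B =====
-- port of Source B: acc starts as the last list; fold over the remaining lists in reverse order
def build_values_from_property_values_alt (property_values_list : List (List String)) : List String :=
  match property_values_list.reverse with
  | [] => []
  | last :: earlier =>
    earlier.foldl (fun acc lst => lst.flatMap (fun v => acc.map (fun s => v ++ "," ++ s))) last

-- ===== PRECONDITION & SPEC =====
def Spec_build_values_from_property_values (property_values_list : List (List String)) (out : List String) : Prop := out = build_values_from_property_values_alt property_values_list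
instance (property_values_list : List (List String)) (out : List String) : Decidable (Spec_build_values_from_property_values property_values_list out) := by unfold Spec_build_values_from_property_values; infer_instance

-- ===== CLAIM (what is proved, stated in full; the proofs are below) =====
def Claim_equal_build_values_from_property_values : Prop := ∀ (property_values_list : List (List String)), Dom_build_values_from_property_values property_values_list → Spec_build_values_from_property_values property_values_list (build_values_from_property_values property_values_list)

-- ===== LEMMAS AND PROOFS =====

-- A's accumulating loop is a flatMap
theorem foldl_append_map_eq_flatMap (xs : List String) (g : String → List String) (acc : List String) :
    xs.foldl (fun a v => a ++ g v) acc = acc ++ xs.flatMap g := by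
  induction xs generalizing acc with
  | nil => simp
  | cons x xs ih => simp [List.foldl, ih, List.flatMap_cons, List.append_assoc]

theorem alt_cons (pv : List String) (rest : List (List String)) (h : rest ≠ []) :
    build_values_from_property_values_alt (pv :: rest) =
      pv.flatMap (fun v => (build_values_from_property_values_alt rest).map (fun s => v ++ "," ++ s)) := by
  unfold build_values_from_property_values_alt
  obtain ⟨last, earlier, hrev⟩ : ∃ l e, rest.reverse = l :: e := by
    rcases hr : rest.reverse with _ | ⟨l, e⟩
    · exact absurd (by simpa using congrArg List.reverse hr) h
    · exact ⟨l, e, rfl⟩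
  have : (pv :: rest).reverse = last :: (earlier ++ [pv]) := by
    simp [List.reverse_cons, hrev]
  rw [this, hrev]
  simp [List.foldl_append]

theorem a_eq_b (l : List (List String)) :
    build_values_from_property_values l = build_values_from_property_values_alt l := by
  induction l with
  | nil => simp [build_values_from_property_values, build_values_from_property_values_alt]
  | cons pv rest ih =>
    cases rest with
    | nil => simp [build_values_from_property_values, build_values_from_property_values_alt]
    | cons q qs =>
      rw [alt_cons pv (q :: qs) (by simp)]
      simp only [build_values_from_property_values]
      rw [foldl_append_map_eq_flatMap, ih]
      simp

-- ===== VERDICT (by name: the statement is the Claim_ definition above) =====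
theorem build_values_from_property_values_spec : Claim_equal_build_values_from_property_values := by
  intro l _
  exact a_eq_b l
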